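-- pv_equiv track=rewrite | github.com/ikeshou/Kyoupuro_library_python | 6_typical_dp/9_longest_palindrome_substring.py | reconstruct_longest_palindrome
-- ===== SOURCE A (Python) =====
-- def reconstruct_longest_palindrome(s, dp):
--     """
--     dummy 文字列を挿入した inserted_s に対し計算した極大回文半径を記した dp テーブルをもとに
--     O(n) で最長の回文部分文字列を求めてリストで返す
--     """
--     # 偶数 i について dp[i] = r のとき、もとの文字列での回文長は 1 + ((r-1)//2)  * 2 = (r-1 if r%2==0 else r)
--     # 奇数 i について dp[i] = r のとき、もとの文字列での回文長は (r//2) * 2 = (r if r%2==0 else r-1)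
--     n = len(dp)
--     max_length = -1
--     indices = []
--     for i in range(n):
--         r = dp[i]
--         if i % 2 == 0:
--             size = r - 1 if r % 2 == 0 else r
--         else:
--             size = r if r % 2 == 0 else r - 1
--         if max_length < size:
--             indices, max_length = [i], size
--         elif max_length == size:
--             indices.append(i)
--     ans = []
--     for ind in indices:
--         if ind % 2 == 0:
--             center_ind = ind // 2
--             ans.append(s[center_ind - (max_length-1)//2 : center_ind + (max_length-1)//2 + 1])
--         else:
--             slice_center = (ind + 1) // 2
--             ans.append(s[slice_center - max_length//2 : slice_center + max_length//2])
--     return ans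
-- ===== SOURCE B (Python) =====
-- def _cut(s, m, ind):
--     if ind % 2 == 0:
--         c = ind // 2
--         return s[c - (m - 1) // 2 : c + (m - 1) // 2 + 1]
--     else:
--         c = (ind + 1) // 2
--         return s[c - m // 2 : c + m // 2]
--
--
-- def reconstruct_longest_palindrome(s, dp):
--     # group every center index into a bucket keyed by its decoded palindrome length;
--     # the answer is simply the bucket of the largest key (floored at A's -1 baseline)
--     buckets = {}
--     for i, r in enumerate(dp):
--         size = (r - 1 if r % 2 == 0 else r) if i % 2 == 0 else (r if r % 2 == 0 else r - 1)
--         buckets.setdefault(size, []).append(i)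
--     m = max([-1, *buckets])
--     return [_cut(s, m, ind) for ind in buckets.get(m, [])]
-- ===== Notes on version B (the rewrite author's own statement) =====
-- stated objective: alternative
-- what changed: Replaces A's online max/argmax-tracking loop with a grouping dictionary (palindrome length -> list of center indices) built in one pass; the result is read off as the bucket of the maximum key, so no argmax tracking or filtering pass over sizes exists.
import Mathlib
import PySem

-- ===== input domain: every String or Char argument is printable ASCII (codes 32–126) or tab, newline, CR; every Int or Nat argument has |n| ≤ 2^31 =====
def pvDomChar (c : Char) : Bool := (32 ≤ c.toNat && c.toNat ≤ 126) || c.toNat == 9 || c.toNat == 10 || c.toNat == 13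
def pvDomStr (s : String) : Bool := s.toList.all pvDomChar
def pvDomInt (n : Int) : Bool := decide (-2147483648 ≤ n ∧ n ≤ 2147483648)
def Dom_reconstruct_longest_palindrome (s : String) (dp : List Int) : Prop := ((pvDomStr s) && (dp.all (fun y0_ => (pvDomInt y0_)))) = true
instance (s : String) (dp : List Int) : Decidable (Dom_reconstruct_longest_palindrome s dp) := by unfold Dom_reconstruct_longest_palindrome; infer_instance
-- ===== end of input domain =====

-- B replaces A's online max/argmax-tracking loop with a grouping dictionary
-- (palindrome length -> list of center indices); the answer is the bucket of the
-- maximum key (objective: alternative decomposition, same cost). Return value only.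

-- the original-string palindrome length encoded by radius r at position i of the
-- dummy-inserted string (the formula both Pythons share, from A's comments)
def pvSize (i r : Int) : Int :=
  if PySem.Int.mod i 2 = 0 then (if PySem.Int.mod r 2 = 0 then r - 1 else r)
  else (if PySem.Int.mod r 2 = 0 then r else r - 1)

-- ===== PORT A =====
def reconstruct_longest_palindrome (s : String) (dp : List Int) : List String :=
  -- for i in range(n): r = dp[i]  — the loop over indices reading dp[i], as a fold over enumerate
  let st := (PySem.List.enumerate dp 0).foldl
    (fun (acc : Int × List Int) p =>
      let size := pvSize p.1 p.2
      if acc.1 < size then (size, [p.1])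
      else if acc.1 = size then (acc.1, acc.2 ++ [p.1])
      else acc)
    (-1, [])
  st.2.foldl
    (fun ans ind =>
      if PySem.Int.mod ind 2 = 0 then
        let c := PySem.Int.floordiv ind 2
        ans ++ [PySem.Str.slice s (some (c - PySem.Int.floordiv (st.1 - 1) 2))
                                  (some (c + PySem.Int.floordiv (st.1 - 1) 2 + 1))]
      else
        let c := PySem.Int.floordiv (ind + 1) 2
        ans ++ [PySem.Str.slice s (some (c - PySem.Int.floordiv st.1 2))
                                  (some (c + PySem.Int.floordiv st.1 2))])
    []

-- ===== PORT B =====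
-- Source B's _cut helper
def pvCut (s : String) (m ind : Int) : String :=
  if PySem.Int.mod ind 2 = 0 then
    let c := PySem.Int.floordiv ind 2
    PySem.Str.slice s (some (c - PySem.Int.floordiv (m - 1) 2))
                      (some (c + PySem.Int.floordiv (m - 1) 2 + 1))
  else
    let c := PySem.Int.floordiv (ind + 1) 2
    PySem.Str.slice s (some (c - PySem.Int.floordiv m 2))
                      (some (c + PySem.Int.floordiv m 2))

def reconstruct_longest_palindrome_alt (s : String) (dp : List Int) : List String :=
  -- buckets.setdefault(size, []).append(i)  is  d[size] = d.get(size, []) + [i]  = Dict.modify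
  let buckets := (PySem.List.enumerate dp 0).foldl
    (fun (d : PySem.Dict Int (List Int)) p => d.modify (pvSize p.1 p.2) [] (· ++ [p.1]))
    PySem.Dict.empty
  -- max([-1, *buckets]): Python's max over ints is the running-max fold from the head -1
  let m := buckets.keys.foldl max (-1)
  (buckets.getD m []).map (pvCut s m)

-- ===== PRECONDITION & SPEC =====
def Spec_reconstruct_longest_palindrome (s : String) (dp : List Int) (out : List String) : Prop := out = reconstruct_longest_palindrome_alt s dp
instance (s : String) (dp : List Int) (out : List String) : Decidable (Spec_reconstruct_longest_palindrome s dp out) := by unfold Spec_reconstruct_longest_palindrome; infer_instance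

-- ===== CLAIM (what is proved, stated in full; the proofs are below) =====
def Claim_equal_reconstruct_longest_palindrome : Prop := ∀ (s : String) (dp : List Int), Dom_reconstruct_longest_palindrome s dp → Spec_reconstruct_longest_palindrome s dp (reconstruct_longest_palindrome s dp)

-- ===== LEMMAS AND PROOFS =====

-- A's online loop, characterised: it ends in the running max and the argmax indices.
theorem pvLoop_inv (l : List (Int × Int)) : ∀ (m : Int) (idxs : List Int),
    l.foldl (fun (acc : Int × List Int) p =>
        let size := pvSize p.1 p.2
        if acc.1 < size then (size, [p.1])
        else if acc.1 = size then (acc.1, acc.2 ++ [p.1])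
        else acc) (m, idxs)
      = (l.foldl (fun a p => max a (pvSize p.1 p.2)) m,
         (if l.foldl (fun a p => max a (pvSize p.1 p.2)) m = m then idxs else []) ++
           ((l.filter (fun p => pvSize p.1 p.2 == l.foldl (fun a p => max a (pvSize p.1 p.2)) m)).map (·.1))) := by
  induction l with
  | nil => intro m idxs; simp
  | cons hd tl ih =>
    intro m idxs
    have hle : ∀ (a : Int) (t : List (Int × Int)), a ≤ t.foldl (fun a p => max a (pvSize p.1 p.2)) a :=
      fun a t => (PySem.List.le_foldl_max_int t (fun p => pvSize p.1 p.2) a).1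
    simp only [List.foldl_cons, List.filter_cons]
    by_cases h1 : m < pvSize hd.1 hd.2
    · have hmax : max m (pvSize hd.1 hd.2) = pvSize hd.1 hd.2 := by omega
      rw [if_pos h1, ih (pvSize hd.1 hd.2) [hd.1]]
      simp only [hmax]
      have hF := hle (pvSize hd.1 hd.2) tl
      have hne : tl.foldl (fun a p => max a (pvSize p.1 p.2)) (pvSize hd.1 hd.2) ≠ m := by omega
      by_cases h2 : pvSize hd.1 hd.2 = tl.foldl (fun a p => max a (pvSize p.1 p.2)) (pvSize hd.1 hd.2)
      · have hbeq : (pvSize hd.1 hd.2 == tl.foldl (fun a p => max a (pvSize p.1 p.2)) (pvSize hd.1 hd.2)) = true :=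
          beq_iff_eq.mpr h2
        rw [if_pos h2.symm, if_neg hne]; simp [hbeq]
      · have hbeq : (pvSize hd.1 hd.2 == tl.foldl (fun a p => max a (pvSize p.1 p.2)) (pvSize hd.1 hd.2)) = false := by
          simp [h2]
        rw [if_neg (Ne.symm h2), if_neg hne]; simp [hbeq]
    · by_cases h2 : m = pvSize hd.1 hd.2
      · have hmax : max m (pvSize hd.1 hd.2) = m := by omega
        rw [if_neg h1, if_pos h2, ih m (idxs ++ [hd.1])]
        simp only [hmax]
        by_cases h3 : tl.foldl (fun a p => max a (pvSize p.1 p.2)) m = m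
        · have hbeq : (pvSize hd.1 hd.2 == tl.foldl (fun a p => max a (pvSize p.1 p.2)) m) = true := by
            simp [← h2, h3]
          rw [if_pos h3, if_pos h3]; simp [hbeq]
        · have hbeq : (pvSize hd.1 hd.2 == tl.foldl (fun a p => max a (pvSize p.1 p.2)) m) = false := by
            simp [← h2]; omega
          rw [if_neg h3, if_neg h3]; simp [hbeq]
      · have hmax : max m (pvSize hd.1 hd.2) = m := by omega
        rw [if_neg h1, if_neg h2, ih m idxs]
        simp only [hmax]
        have hF := hle m tl
        have hbeq : (pvSize hd.1 hd.2 == tl.foldl (fun a p => max a (pvSize p.1 p.2)) m) = false := by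
          simp; omega
        simp [hbeq]

-- two lists with the same members have the same running max from any start
theorem pvFoldlMax_eq_of_mem_iff (xs ys : List Int) (a : Int)
    (h : ∀ x, x ∈ xs ↔ x ∈ ys) : xs.foldl max a = ys.foldl max a := by
  have hb : ∀ (zs ws : List Int), (∀ x ∈ zs, x ∈ ws) → zs.foldl max a ≤ ws.foldl max a := by
    intro zs ws hsub
    rcases PySem.List.foldl_max_mem zs a with he | hm
    · rw [he]; exact (PySem.List.le_foldl_max ws a).1
    · exact (PySem.List.le_foldl_max ws a).2 _ (hsub _ hm)
  exact le_antisymm (hb xs ys fun x hx => (h x).1 hx) (hb ys xs fun x hx => (h x).2 hx)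

-- A's second loop, with the branch pushed inside the append
theorem pvSecond_loop (s : String) (M : Int) (idxs : List Int) (acc : List String) :
    idxs.foldl
      (fun ans ind =>
        if PySem.Int.mod ind 2 = 0 then
          let c := PySem.Int.floordiv ind 2
          ans ++ [PySem.Str.slice s (some (c - PySem.Int.floordiv (M - 1) 2))
                                    (some (c + PySem.Int.floordiv (M - 1) 2 + 1))]
        else
          let c := PySem.Int.floordiv (ind + 1) 2
          ans ++ [PySem.Str.slice s (some (c - PySem.Int.floordiv M 2))
                                    (some (c + PySem.Int.floordiv M 2))]) acc
      = acc ++ idxs.map (pvCut s M) := by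
  have h : ∀ (a : List String) (ind : Int),
      (if PySem.Int.mod ind 2 = 0 then
          let c := PySem.Int.floordiv ind 2
          a ++ [PySem.Str.slice s (some (c - PySem.Int.floordiv (M - 1) 2))
                                  (some (c + PySem.Int.floordiv (M - 1) 2 + 1))]
        else
          let c := PySem.Int.floordiv (ind + 1) 2
          a ++ [PySem.Str.slice s (some (c - PySem.Int.floordiv M 2))
                                  (some (c + PySem.Int.floordiv M 2))])
        = a ++ [pvCut s M ind] := by
    intro a ind; unfold pvCut; split <;> rfl
  calc idxs.foldl _ acc = idxs.foldl (fun a ind => a ++ [pvCut s M ind]) acc := by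
        apply PySem.List.foldl_congr_mem; intro a x _; exact h a x
    _ = acc ++ idxs.map (pvCut s M) := PySem.List.foldl_append_singleton_eq_map _ _ _

-- ===== VERDICT (by name: the statement is the Claim_ definition above) =====
theorem reconstruct_longest_palindrome_spec : Claim_equal_reconstruct_longest_palindrome := by
  intro s dp _
  unfold Spec_reconstruct_longest_palindrome reconstruct_longest_palindrome reconstruct_longest_palindrome_alt
  simp only []
  rw [pvLoop_inv (PySem.List.enumerate dp 0) (-1) [], pvSecond_loop]
  set enum := PySem.List.enumerate dp 0 with henum
  -- the bucket fold is a keyed modify-fold over the (size, index) pairs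
  have hbuild : enum.foldl
      (fun (d : PySem.Dict Int (List Int)) p => d.modify (pvSize p.1 p.2) [] (· ++ [p.1]))
      PySem.Dict.empty
      = (enum.map (fun p => (pvSize p.1 p.2, p.1))).foldl
          (fun (d : PySem.Dict Int (List Int)) q => d.modify q.1 [] (· ++ [q.2]))
          PySem.Dict.empty := by
    rw [List.foldl_map]
  rw [hbuild]
  -- keys of the bucket dict are exactly the set of sizes
  have hkeys : ((enum.map (fun p => (pvSize p.1 p.2, p.1))).foldl
      (fun (d : PySem.Dict Int (List Int)) q => d.modify q.1 [] (· ++ [q.2]))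
      PySem.Dict.empty).keys
      = PySem.Set.ofList (enum.map (fun p => pvSize p.1 p.2)) := by
    rw [PySem.Dict.keys_foldl_modify_key]
    simp [PySem.Set.update_nil_left, List.map_map, Function.comp_def, PySem.Dict.keys_empty]
  -- hence both maxima coincide
  have hmax : ((enum.map (fun p => (pvSize p.1 p.2, p.1))).foldl
      (fun (d : PySem.Dict Int (List Int)) q => d.modify q.1 [] (· ++ [q.2]))
      PySem.Dict.empty).keys.foldl max (-1)
      = enum.foldl (fun a p => max a (pvSize p.1 p.2)) (-1) := by
    rw [hkeys, pvFoldlMax_eq_of_mem_iff _ (enum.map (fun p => pvSize p.1 p.2)) (-1)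
      (fun x => PySem.Set.mem_ofList _ x), List.foldl_map]
  rw [hmax]
  set M := enum.foldl (fun a p => max a (pvSize p.1 p.2)) (-1) with hM
  -- the top bucket is exactly A's argmax index list
  rw [PySem.Dict.getD_foldl_modify_append, PySem.Dict.getD_empty, List.filter_map,
    List.map_map]
  simp [Function.comp_def]
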